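-- pv_equiv track=rewrite | github.com/yurithegreat357/python-first-practise | Window Linux conversion/pm2_station_cal_step_param.py | array_converter
-- ===== SOURCE A (Python) =====
-- def array_converter(row, input_array):
--     """
--     Convert any list format array into labview compatible one.
--     :param row: The row of the formatted array
--     for example:
--     in this 4 row array.
--     [1, 1, 1, 2,
--      2, 2, 1, 2,
--      3, 1, 2, 2,
--     ]
--     the output is 1,1,1,2
--                   2,2,1,2
--                   3,1,2,2
--     :return: The formatted array.
--     """
--     buffer = ''
--     output_buff = ''
--     row_buff = 0
--     for i in input_array:
--         row_buff += 1
--         buffer += str(i) + ','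
--         if row_buff == row:
--             buffer = buffer[:-1]
--             buffer += '\n'
--             output_buff += buffer
--             buffer = ''
--             row_buff = 0
--     return output_buff
-- ===== SOURCE B (Python) =====
-- def array_converter(row, input_array):
--     """Recursive chunking: emit one complete row per call, drop the remainder."""
--     if row < 1 or len(input_array) < row:
--         return ''
--     head = ','.join(str(x) for x in input_array[:row])
--     return head + '\n' + array_converter(row, input_array[row:])
-- ===== Notes on version B (the rewrite author's own statement) =====
-- stated objective: simpler
-- what changed: Replaces A's element-by-element loop with a mutable buffer/counter by direct recursive chunking: each call slices one complete row off the front and joins it with ','; incomplete trailing rows (and non-positive row counts) fall out of the base case naturally.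
import Mathlib
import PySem

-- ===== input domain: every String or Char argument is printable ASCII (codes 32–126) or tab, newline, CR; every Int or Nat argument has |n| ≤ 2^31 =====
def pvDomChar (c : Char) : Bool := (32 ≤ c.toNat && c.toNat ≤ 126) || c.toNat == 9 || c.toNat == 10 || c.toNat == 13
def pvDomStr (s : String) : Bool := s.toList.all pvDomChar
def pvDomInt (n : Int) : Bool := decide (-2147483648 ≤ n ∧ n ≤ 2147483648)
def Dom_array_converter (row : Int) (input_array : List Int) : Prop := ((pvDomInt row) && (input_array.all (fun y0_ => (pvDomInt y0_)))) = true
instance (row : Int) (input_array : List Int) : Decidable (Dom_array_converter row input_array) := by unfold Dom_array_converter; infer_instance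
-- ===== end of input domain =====

-- B replaces A's element-by-element counter/buffer accumulation with recursive chunking
-- (one complete row per recursive call, built by ','.join); objective: simpler.


-- ===== PORT A =====
-- the 'for i in input_array' loop; state = (buffer, output_buff, row_buff); buffer[:-1] is PySem.Str.slice … (some (-1))
def pvALoop (row : Int) (xs : List Int) (buffer output : String) (cnt : Int) : String :=
  match xs with
  | [] => output
  | i :: rest =>
    let cnt' := cnt + 1
    let buffer' := buffer ++ PySem.Int.toStr i ++ ","
    if cnt' = row then
      pvALoop row rest "" (output ++ PySem.Str.slice buffer' none (some (-1)) ++ "\n") 0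
    else
      pvALoop row rest buffer' output cnt'

def array_converter (row : Int) (input_array : List Int) : String :=
  pvALoop row input_array "" "" 0

-- ===== PORT B =====
-- recursive chunking as in Source B; in the else branch 1 ≤ row, so the slices
-- input_array[:row] / input_array[row:] are exactly take/drop row.toNat
def array_converter_alt (row : Int) (input_array : List Int) : String :=
  if h : row < 1 ∨ (input_array.length : Int) < row then ""
  else
    PySem.Str.join "," ((input_array.take row.toNat).map PySem.Int.toStr) ++ "\n"
      ++ array_converter_alt row (input_array.drop row.toNat)
termination_by input_array.length
decreasing_by
  simp only [List.length_drop]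
  rw [not_or] at h
  omega

-- ===== PRECONDITION & SPEC =====
def Spec_array_converter (row : Int) (input_array : List Int) (out : String) : Prop := out = array_converter_alt row input_array
instance (row : Int) (input_array : List Int) (out : String) : Decidable (Spec_array_converter row input_array out) := by unfold Spec_array_converter; infer_instance

-- ===== CLAIM (what is proved, stated in full; the proofs are below) =====
def Claim_equal_array_converter : Prop := ∀ (row : Int) (input_array : List Int), Dom_array_converter row input_array → Spec_array_converter row input_array (array_converter row input_array)

-- ===== LEMMAS AND PROOFS =====

-- the characters A's buffer holds after accumulating the pending elements p
def pvRend (p : List Int) : List Char := (p.map (fun x => PySem.Int.toChars x ++ [','])).flatten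

theorem pvRend_cons (a : Int) (l : List Int) :
    pvRend (a :: l) = (PySem.Int.toChars a ++ [',']) ++ pvRend l := by
  simp [pvRend]

theorem pvRend_ne_nil (a : Int) (l : List Int) : pvRend (a :: l) ≠ [] := by
  simp [pvRend_cons]

theorem pvRend_append_singleton (p : List Int) (i : Int) :
    pvRend (p ++ [i]) = pvRend p ++ (PySem.Int.toChars i ++ [',']) := by
  simp [pvRend]

-- dropping the trailing comma of the buffer gives exactly ','.join
theorem pvJoin_eq_dropLast_rend (q : List Int) (hq : q ≠ []) :
    PySem.Chars.join [','] (q.map PySem.Int.toChars) = (pvRend q).dropLast := by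
  induction q with
  | nil => exact absurd rfl hq
  | cons x l ih =>
    cases l with
    | nil =>
      rw [List.map_cons, List.map_nil, PySem.Chars.join_singleton, pvRend_cons]
      simp [pvRend]
    | cons y l' =>
      simp only [List.map_cons] at ih ⊢
      rw [PySem.Chars.join_cons_cons, ih (by simp)]
      conv_rhs => rw [pvRend_cons]
      rw [List.dropLast_append_of_ne_nil (pvRend_ne_nil y l'), List.append_assoc]

-- B's row line equals A's flushed buffer (both as strings)
theorem pvLine_eq (q : List Int) (hq : q ≠ []) (b : String) (hb : b.toList = pvRend q) :
    PySem.Str.slice b none (some (-1)) = PySem.Str.join "," (q.map PySem.Int.toStr) := by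
  apply String.toList_inj.mp
  rw [PySem.Str.slice_to_neg_one, PySem.Str.toList_join, hb]
  rw [← pvJoin_eq_dropLast_rend q hq, List.map_map]
  congr 1
  exact List.map_congr_left (fun x _ => (PySem.Int.toList_toStr x).symm)

theorem pvString_append_empty (s : String) : s ++ "" = s := by
  apply String.toList_inj.mp; simp

theorem pvString_empty_append (s : String) : "" ++ s = s := by
  apply String.toList_inj.mp; simp

-- with a non-positive row the counter never hits row: A emits nothing
theorem pvALoop_neg (row : Int) (hrow : row < 1) (xs : List Int) :
    ∀ (b out : String) (c : Int), 0 ≤ c → pvALoop row xs b out c = out := by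
  induction xs with
  | nil => intro b out c _; rfl
  | cons i rest ih =>
    intro b out c hc
    have hne : ¬ (c + 1 = row) := by omega
    simp only [pvALoop, hne, if_false]
    exact ih _ out (c + 1) (by omega)

-- invariant of A's loop: buffer holds the rendering of the pending elements p
theorem pvALoop_inv (row : Int) (hrow : 1 ≤ row) (xs : List Int) :
    ∀ (p : List Int) (b out : String), b.toList = pvRend p → p.length < row.toNat →
      pvALoop row xs b out ((p.length : Int)) = out ++ array_converter_alt row (p ++ xs) := by
  induction xs with
  | nil =>
    intro p b out hb hlen
    have hguard : row < 1 ∨ ((p ++ ([] : List Int)).length : Int) < row := by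
      right; simp; omega
    rw [array_converter_alt, dif_pos hguard]
    exact (pvString_append_empty out).symm
  | cons i rest ih =>
    intro p b out hb hlen
    simp only [pvALoop]
    have hb' : (b ++ PySem.Int.toStr i ++ ",").toList = pvRend (p ++ [i]) := by
      rw [pvRend_append_singleton]
      simp [hb, PySem.Int.toList_toStr]
    by_cases hfl : (p.length : Int) + 1 = row
    · rw [if_pos hfl]
      have hlen' : (p ++ [i]).length = row.toNat := by simp; omega
      have hrec := ih [] "" (out ++ PySem.Str.slice (b ++ PySem.Int.toStr i ++ ",") none (some (-1)) ++ "\n") (by simp [pvRend]) (by simp only [List.length_nil]; omega)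
      simp only [List.length_nil, Int.natCast_zero, List.nil_append] at hrec
      rw [hrec]
      have hassoc : p ++ i :: rest = (p ++ [i]) ++ rest := by simp
      rw [hassoc]
      have hguard : ¬ (row < 1 ∨ ((p ++ [i] ++ rest).length : Int) < row) := by
        rw [not_or]
        refine ⟨by omega, ?_⟩
        simp only [List.length_append, hlen']
        push_cast
        omega
      conv_rhs => rw [array_converter_alt]
      rw [dif_neg hguard]
      rw [List.take_append_of_le_length (by omega), List.drop_append_of_le_length (by omega)]
      rw [List.take_of_length_le (by omega), List.drop_eq_nil_of_le (by omega), List.nil_append]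
      rw [pvLine_eq (p ++ [i]) (by simp) _ hb']
      simp [String.append_assoc]
    · rw [if_neg hfl]
      have hstep : (p.length : Int) + 1 = ((p ++ [i]).length : Int) := by simp
      rw [hstep]
      rw [ih (p ++ [i]) _ out hb' (by simp; omega)]
      simp only [List.append_assoc, List.singleton_append]

-- ===== VERDICT (by name: the statement is the Claim_ definition above) =====
theorem array_converter_spec : Claim_equal_array_converter := by
  intro row input_array _
  unfold Spec_array_converter array_converter
  by_cases hrow : 1 ≤ row
  · have h := pvALoop_inv row hrow input_array [] "" "" (by simp [pvRend]) (by simp only [List.length_nil]; omega)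
    simp only [List.length_nil, Int.natCast_zero, List.nil_append] at h
    rw [h, pvString_empty_append]
  · rw [pvALoop_neg row (by omega) input_array "" "" 0 le_rfl]
    rw [array_converter_alt, dif_pos (Or.inl (by omega))]
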